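-- pv_equiv track=rewrite | github.com/Sebastian09-09/Kenta_ | mangaDownloaderThreads.py | clearName
-- ===== SOURCE A (Python) =====
-- def clearName(name):
--     newName = ''
--     whitespace = 0
--     for i in name:
--         if i == ' ' and whitespace == 0:
--             whitespace = 1
--             newName += i
--         if i != ' ':
--             whitespace = 0
--             newName += i
--     if "\r" in newName:
--         newName = newName.replace("\r", " ")
--     if "\n" in newName:
--         newName = newName.replace("\n", " ")
--     for i in [":", "\\", "/", "|", "*", "<", ">", "?", '"']:
--         if i in newName:
--             newName = newName.replace(i, "_")
--     return (newName)
-- ===== SOURCE B (Python) =====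
-- # Single pass: pair each char with its predecessor (sentinel for the first), keep a space
-- # only when its predecessor is not a space, and translate chars through one lookup table.
-- _MAP = {'\r': ' ', '\n': ' ', ':': '_', '\\': '_', '/': '_', '|': '_',
--         '*': '_', '<': '_', '>': '_', '?': '_', '"': '_'}
--
-- def clearName(name):
--     return ''.join(_MAP.get(c, c)
--                    for p, c in zip('\x00' + name, name)
--                    if c != ' ' or p != ' ')
-- ===== Notes on version B (the rewrite author's own statement) =====
-- stated objective: idiomatic
-- what changed: Replaces the stateful whitespace-flag loop with a single predecessor-pairing filter (zip of the string with itself shifted by one) and collapses the eleven sequential guarded str.replace passes into one per-character table lookup.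
import Mathlib
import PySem

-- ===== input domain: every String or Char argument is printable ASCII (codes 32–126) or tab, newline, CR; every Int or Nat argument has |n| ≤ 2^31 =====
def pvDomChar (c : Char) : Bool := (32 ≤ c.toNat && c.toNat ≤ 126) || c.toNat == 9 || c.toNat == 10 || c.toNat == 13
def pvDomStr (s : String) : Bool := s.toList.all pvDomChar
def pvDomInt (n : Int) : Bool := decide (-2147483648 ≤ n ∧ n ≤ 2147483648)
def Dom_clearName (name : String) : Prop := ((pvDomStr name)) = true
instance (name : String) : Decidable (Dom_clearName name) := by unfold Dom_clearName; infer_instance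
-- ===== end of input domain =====

-- B replaces A's stateful space-collapse loop by a predecessor-zip filter and A's
-- chain of guarded .replace passes by a single per-character table lookup (alternative/idiomatic).


-- ===== PORT A =====
-- one step of A's character loop: state = (whitespace flag, accumulated chars)
def pvStepA (st : Int × List Char) (i : Char) : Int × List Char :=
  let st := if i = ' ' ∧ st.1 = 0 then ((1 : Int), st.2 ++ [i]) else st
  if i ≠ ' ' then ((0 : Int), st.2 ++ [i]) else st

-- one pass of A's final loop: `if i in newName: newName = newName.replace(i, "_")`
def pvBadPass (n : List Char) (i : Char) : List Char :=
  if PySem.Chars.isIn [i] n then PySem.Chars.replace n [i] ['_'] else n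

def clearName (name : String) : String :=
  let newName := (name.toList.foldl pvStepA ((0 : Int), [])).2
  let newName := if PySem.Chars.isIn ['\r'] newName then PySem.Chars.replace newName ['\r'] [' '] else newName
  let newName := if PySem.Chars.isIn ['\n'] newName then PySem.Chars.replace newName ['\n'] [' '] else newName
  let newName := [':', '\\', '/', '|', '*', '<', '>', '?', '"'].foldl pvBadPass newName
  String.mk newName

-- ===== PORT B =====
def pvMapB : PySem.Dict Char Char :=
  PySem.Dict.ofList [('\r', ' '), ('\n', ' '), (':', '_'), ('\\', '_'), ('/', '_'), ('|', '_'),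
                     ('*', '_'), ('<', '_'), ('>', '_'), ('?', '_'), ('"', '_')]

def clearName_alt (name : String) : String :=
  String.mk (((List.zip (Char.ofNat 0 :: name.toList) name.toList).filter
      (fun q => !(q.2 == ' ') || !(q.1 == ' '))).map
      (fun q => pvMapB.getD q.2 q.2))

-- ===== PRECONDITION & SPEC =====
def Spec_clearName (name : String) (out : String) : Prop := out = clearName_alt name
instance (name : String) (out : String) : Decidable (Spec_clearName name out) := by unfold Spec_clearName; infer_instance

-- ===== CLAIM (what is proved, stated in full; the proofs are below) =====
def Claim_equal_clearName : Prop := ∀ (name : String), Dom_clearName name → Spec_clearName name (clearName name)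

-- ===== LEMMAS AND PROOFS =====

-- A's loop over xs, resumed after a previous character p, appends exactly B's predecessor-filtered chars.
theorem pvFoldA_eq (xs : List Char) (p : Char) (acc : List Char) :
    (xs.foldl pvStepA ((if p = ' ' then 1 else 0 : Int), acc)).2 =
      acc ++ ((List.zip (p :: xs) xs).filter (fun q => !(q.2 == ' ') || !(q.1 == ' '))).map (·.2) := by
  induction xs generalizing p acc with
  | nil => simp
  | cons c t ih =>
    rw [List.foldl_cons]
    by_cases hc : c = ' '
    · by_cases hp : p = ' '
      · have hst : pvStepA ((if p = ' ' then 1 else 0 : Int), acc) c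
            = ((if c = ' ' then 1 else 0 : Int), acc) := by simp [pvStepA, hc, hp]
        rw [hst, ih c acc]; simp [hc, hp]
      · have hst : pvStepA ((if p = ' ' then 1 else 0 : Int), acc) c
            = ((if c = ' ' then 1 else 0 : Int), acc ++ [c]) := by simp [pvStepA, hc, hp]
        rw [hst, ih c (acc ++ [c])]; simp [hc, hp]
    · have hst : pvStepA ((if p = ' ' then 1 else 0 : Int), acc) c
          = ((if c = ' ' then 1 else 0 : Int), acc ++ [c]) := by simp [pvStepA, hc]
      rw [hst, ih c (acc ++ [c])]; simp [hc]

theorem pvGo_eq (c d : Char) (l : List Char) (fuel : Nat) (acc : List Char)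
    (h : l.length ≤ fuel) :
    PySem.Chars.replace.go [c] [d] fuel l acc =
      acc.reverse ++ l.map (fun x => if x = c then d else x) := by
  induction l generalizing fuel acc with
  | nil => cases fuel <;> simp [PySem.Chars.replace.go]
  | cons x t ih =>
    cases fuel with
    | zero => simp at h
    | succ n =>
      by_cases hx : x = c
      · simp [PySem.Chars.replace.go, List.isPrefixOf, hx, ih _ _ (by simpa using h)]
      · simp [PySem.Chars.replace.go, List.isPrefixOf, hx, Ne.symm hx,
              ih _ _ (by simpa using h)]

-- single-character str.replace is a character map
theorem pvReplace_eq_map (c d : Char) (l : List Char) :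
    PySem.Chars.replace l [c] [d] = l.map (fun x => if x = c then d else x) := by
  simpa using pvGo_eq c d l l.length [] le_rfl

theorem pvGuardedReplace_eq_map (c d : Char) (l : List Char) :
    (if PySem.Chars.isIn [c] l then PySem.Chars.replace l [c] [d] else l) =
      l.map (fun x => if x = c then d else x) := by
  by_cases h : PySem.Chars.isIn [c] l
  · simp [h, pvReplace_eq_map]
  · have hmem : c ∉ l := by
      intro hc
      obtain ⟨s, t, rfl⟩ := List.append_of_mem hc
      have hinf : [c] <:+: s ++ c :: t := ⟨s, t, by simp⟩
      exact absurd ((PySem.Chars.isIn_iff_infix _ _).2 hinf) (by simpa using h)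
    rw [if_neg h]
    conv_lhs => rw [← List.map_id l]
    refine List.map_congr_left (fun x hx => ?_)
    by_cases e : x = c
    · exact absurd (e ▸ hx) hmem
    · simp [e]

theorem pvItemsB : pvMapB.items = [('\r', ' '), ('\n', ' '), (':', '_'), ('\\', '_'), ('/', '_'),
    ('|', '_'), ('*', '_'), ('<', '_'), ('>', '_'), ('?', '_'), ('"', '_')] := by decide

-- the eleven successive single-character substitutions equal one lookup in B's table
theorem pvChain (x : Char) :
    ((fun x => if x = '"' then '_' else x) ∘
        (fun x => if x = '?' then '_' else x) ∘
          (fun x => if x = '>' then '_' else x) ∘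
            (fun x => if x = '<' then '_' else x) ∘
              (fun x => if x = '*' then '_' else x) ∘
                (fun x => if x = '|' then '_' else x) ∘
                  (fun x => if x = '/' then '_' else x) ∘
                    (fun x => if x = '\\' then '_' else x) ∘
                      (fun x => if x = ':' then '_' else x) ∘
                        (fun x => if x = '\n' then ' ' else x) ∘
                          (fun x => if x = '\r' then ' ' else x)) x = pvMapB.getD x x := by
  by_cases h1 : x = '\r'
  · subst h1; decide
  by_cases h2 : x = '\n'
  · subst h2; decide
  by_cases h3 : x = ':'
  · subst h3; decide
  by_cases h4 : x = '\\'
  · subst h4; decide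
  by_cases h5 : x = '/'
  · subst h5; decide
  by_cases h6 : x = '|'
  · subst h6; decide
  by_cases h7 : x = '*'
  · subst h7; decide
  by_cases h8 : x = '<'
  · subst h8; decide
  by_cases h9 : x = '>'
  · subst h9; decide
  by_cases h10 : x = '?'
  · subst h10; decide
  by_cases h11 : x = '"'
  · subst h11; decide
  simp [PySem.Dict.getD, PySem.Dict.get?, pvItemsB, List.find?,
        h1, h2, h3, h4, h5, h6, h7, h8, h9, h10, h11,
        beq_eq_false_iff_ne.mpr (Ne.symm h1), beq_eq_false_iff_ne.mpr (Ne.symm h2),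
        beq_eq_false_iff_ne.mpr (Ne.symm h3), beq_eq_false_iff_ne.mpr (Ne.symm h4),
        beq_eq_false_iff_ne.mpr (Ne.symm h5), beq_eq_false_iff_ne.mpr (Ne.symm h6),
        beq_eq_false_iff_ne.mpr (Ne.symm h7), beq_eq_false_iff_ne.mpr (Ne.symm h8),
        beq_eq_false_iff_ne.mpr (Ne.symm h9), beq_eq_false_iff_ne.mpr (Ne.symm h10),
        beq_eq_false_iff_ne.mpr (Ne.symm h11)]

-- ===== VERDICT (by name: the statement is the Claim_ definition above) =====
theorem clearName_spec : Claim_equal_clearName := by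
  intro name _
  unfold Spec_clearName clearName clearName_alt
  have h0 : ((0 : Int), ([] : List Char)) = ((if Char.ofNat 0 = ' ' then 1 else 0 : Int), []) := by
    decide
  rw [h0, pvFoldA_eq]
  simp only [List.nil_append, List.foldl_cons, List.foldl_nil, pvBadPass,
    pvGuardedReplace_eq_map, List.map_map]
  exact (congrArg String.mk (List.map_congr_left (fun q _ => (pvChain q.2).symm))).symm
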